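-- pv_equiv track=rewrite | github.com/AlpanaP/MCPAgents | BusinessLicenseNavigator/agent.py | get_source_attribution
-- ===== SOURCE A (Python) =====
-- def get_source_attribution(ai_used, delaware_rag_used, business_description):
--     """Generate source attribution information"""
--     sources = []
--     location_info = ""
--
--     # Check if this is a Delaware query
--     business_lower = business_description.lower()
--     is_delaware_query = any(word in business_lower for word in ['delaware', 'de', 'first state'])
--     is_cannabis_query = any(word in business_lower for word in ['cannabis', 'marijuana', 'weed', 'dispensary', 'pot'])
--
--     if ai_used:
--         sources.append(f"**AI Source**: {ai_used}")
--
--     if delaware_rag_used: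
--         sources.append("**Delaware Data Source**: [Delaware Business First Steps](https://firststeps.delaware.gov/topics/)")
--         sources.append("**Vector Database**: Qdrant with semantic search")
--         sources.append("**Delaware Government Resources**: [Division of Corporations](https://corp.delaware.gov/), [Department of State](https://sos.delaware.gov/), [Division of Revenue](https://revenue.delaware.gov/)")
--
--         # Add cannabis-specific sources if applicable
--         if is_cannabis_query:
--             sources.append("**Cannabis Compliance**: [Delaware Cannabis Compliance Commission](https://cannabis.delaware.gov/)")
--             sources.append("**Cannabis Licensing**: [Cannabis Licensing Portal](https://cannabis.delaware.gov/licensing/)")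
--             sources.append("**Cannabis Regulations**: [Cannabis Regulations](https://cannabis.delaware.gov/regulations/)")
--             sources.append("**Cannabis Application**: [Application Portal](https://cannabis.delaware.gov/apply/)")
--             sources.append("**Cannabis Business Guide**: [Business Guide](https://cannabis.delaware.gov/business-guide/)")
--             sources.append("**Cannabis Compliance**: [Compliance Requirements](https://cannabis.delaware.gov/compliance/)")
--             sources.append("**Cannabis Security**: [Security Requirements](https://cannabis.delaware.gov/security/)")
--             sources.append("**Cannabis Testing**: [Testing Requirements](https://cannabis.delaware.gov/testing/)")
--             sources.append("**Legal Framework**: [Delaware Marijuana Control Act](https://delcode.delaware.gov/title16/c047/)")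
--             sources.append("**Medical Marijuana**: [Office of Medical Marijuana](https://dhss.delaware.gov/dhss/dph/hsp/medicalmarijuana.html)")
--
--     # Detect location from business description
--     if is_delaware_query:
--         location_info = "**Location**: Delaware"
--         sources.append("**State Resources**: Delaware government websites")
--         sources.append("**Delaware Specific Links**: [Business First Steps](https://firststeps.delaware.gov/), [Professional Licensing](https://sos.delaware.gov/professional-regulation/), [Tax Registration](https://revenue.delaware.gov/business-tax-registration/)")
--
--         if is_cannabis_query:
--             sources.append("**Delaware Cannabis Resources**: [Cannabis Compliance Commission](https://cannabis.delaware.gov/), [Cannabis Licensing](https://cannabis.delaware.gov/licensing/), [Cannabis Regulations](https://cannabis.delaware.gov/regulations/)")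
--             sources.append("**Delaware Cannabis Support**: DCCC Helpline 1-800-292-7935")
--
--     elif any(word in business_lower for word in ['texas', 'tx']):
--         location_info = "**Location**: Texas"
--         sources.append("**State Resources**: Texas Secretary of State")
--         sources.append("**Texas Specific Links**: [Texas Secretary of State](https://www.sos.state.tx.us/), [Texas Comptroller](https://comptroller.texas.gov/), [Texas Workforce Commission](https://www.twc.texas.gov/)")
--
--     elif any(word in business_lower for word in ['california', 'ca', 'cali']):
--         location_info = "**Location**: California"
--         sources.append("**State Resources**: California Secretary of State")
--         sources.append("**California Specific Links**: [CA Secretary of State](https://www.sos.ca.gov/), [CA Department of Tax](https://www.cdtfa.ca.gov/), [CA Employment Development](https://www.edd.ca.gov/)")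
--
--     elif any(word in business_lower for word in ['new york', 'ny', 'nyc']):
--         location_info = "**Location**: New York"
--         sources.append("**State Resources**: New York Department of State")
--         sources.append("**New York Specific Links**: [NY Department of State](https://www.dos.ny.gov/), [NY Department of Tax](https://www.tax.ny.gov/), [NY Department of Labor](https://www.labor.ny.gov/)")
--
--     elif any(word in business_lower for word in ['florida', 'fl']):
--         location_info = "**Location**: Florida"
--         sources.append("**State Resources**: Florida Department of State")
--         sources.append("**Florida Specific Links**: [FL Department of State](https://dos.myflorida.com/), [FL Department of Revenue](https://floridarevenue.com/), [FL Department of Economic Opportunity](https://floridajobs.org/)")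
--
--     else:
--         location_info = "**Location**: General (Multiple States)"
--         sources.append("**Federal Resources**: Small Business Administration (SBA)")
--         sources.append("**General Business Resources**: [SBA.gov](https://www.sba.gov/), [BusinessUSA](https://business.usa.gov/)")
--
--     # Add federal resources
--     sources.append("**Federal Resources**: [Small Business Administration](https://www.sba.gov/), [IRS Business](https://www.irs.gov/businesses)")
--
--     return location_info, sources
-- ===== SOURCE B (Python) =====
-- # Different algorithm: instead of an ordered elif chain with early exit, region
-- # selection is a min-reduction over ONE flat (keyword, priority) table -- the
-- # region is the smallest priority among all keywords found anywhere in the text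
-- # (order of scanning is irrelevant), then the output is assembled by indexing a
-- # region table and concatenating constant sections.
--
-- _KEYWORD_PRIO = [
--     ("delaware", 0), ("de", 0), ("first state", 0),
--     ("texas", 1), ("tx", 1),
--     ("california", 2), ("ca", 2), ("cali", 2),
--     ("new york", 3), ("ny", 3), ("nyc", 3),
--     ("florida", 4), ("fl", 4),
-- ]
--
-- _REGIONS = [
--     ("**Location**: Delaware", [
--         "**State Resources**: Delaware government websites",
--         "**Delaware Specific Links**: [Business First Steps](https://firststeps.delaware.gov/), [Professional Licensing](https://sos.delaware.gov/professional-regulation/), [Tax Registration](https://revenue.delaware.gov/business-tax-registration/)",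
--     ]),
--     ("**Location**: Texas", [
--         "**State Resources**: Texas Secretary of State",
--         "**Texas Specific Links**: [Texas Secretary of State](https://www.sos.state.tx.us/), [Texas Comptroller](https://comptroller.texas.gov/), [Texas Workforce Commission](https://www.twc.texas.gov/)",
--     ]),
--     ("**Location**: California", [
--         "**State Resources**: California Secretary of State",
--         "**California Specific Links**: [CA Secretary of State](https://www.sos.ca.gov/), [CA Department of Tax](https://www.cdtfa.ca.gov/), [CA Employment Development](https://www.edd.ca.gov/)",
--     ]),
--     ("**Location**: New York", [
--         "**State Resources**: New York Department of State",
--         "**New York Specific Links**: [NY Department of State](https://www.dos.ny.gov/), [NY Department of Tax](https://www.tax.ny.gov/), [NY Department of Labor](https://www.labor.ny.gov/)",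
--     ]),
--     ("**Location**: Florida", [
--         "**State Resources**: Florida Department of State",
--         "**Florida Specific Links**: [FL Department of State](https://dos.myflorida.com/), [FL Department of Revenue](https://floridarevenue.com/), [FL Department of Economic Opportunity](https://floridajobs.org/)",
--     ]),
--     ("**Location**: General (Multiple States)", [
--         "**Federal Resources**: Small Business Administration (SBA)",
--         "**General Business Resources**: [SBA.gov](https://www.sba.gov/), [BusinessUSA](https://business.usa.gov/)",
--     ]),
-- ]
--
-- _DELAWARE_RAG = [
--     "**Delaware Data Source**: [Delaware Business First Steps](https://firststeps.delaware.gov/topics/)",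
--     "**Vector Database**: Qdrant with semantic search",
--     "**Delaware Government Resources**: [Division of Corporations](https://corp.delaware.gov/), [Department of State](https://sos.delaware.gov/), [Division of Revenue](https://revenue.delaware.gov/)",
-- ]
--
-- _CANNABIS_RAG = [
--     "**Cannabis Compliance**: [Delaware Cannabis Compliance Commission](https://cannabis.delaware.gov/)",
--     "**Cannabis Licensing**: [Cannabis Licensing Portal](https://cannabis.delaware.gov/licensing/)",
--     "**Cannabis Regulations**: [Cannabis Regulations](https://cannabis.delaware.gov/regulations/)",
--     "**Cannabis Application**: [Application Portal](https://cannabis.delaware.gov/apply/)",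
--     "**Cannabis Business Guide**: [Business Guide](https://cannabis.delaware.gov/business-guide/)",
--     "**Cannabis Compliance**: [Compliance Requirements](https://cannabis.delaware.gov/compliance/)",
--     "**Cannabis Security**: [Security Requirements](https://cannabis.delaware.gov/security/)",
--     "**Cannabis Testing**: [Testing Requirements](https://cannabis.delaware.gov/testing/)",
--     "**Legal Framework**: [Delaware Marijuana Control Act](https://delcode.delaware.gov/title16/c047/)",
--     "**Medical Marijuana**: [Office of Medical Marijuana](https://dhss.delaware.gov/dhss/dph/hsp/medicalmarijuana.html)",
-- ]
--
-- _DELAWARE_CANNABIS = [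
--     "**Delaware Cannabis Resources**: [Cannabis Compliance Commission](https://cannabis.delaware.gov/), [Cannabis Licensing](https://cannabis.delaware.gov/licensing/), [Cannabis Regulations](https://cannabis.delaware.gov/regulations/)",
--     "**Delaware Cannabis Support**: DCCC Helpline 1-800-292-7935",
-- ]
--
-- _FEDERAL_LINE = "**Federal Resources**: [Small Business Administration](https://www.sba.gov/), [IRS Business](https://www.irs.gov/businesses)"
--
--
-- def get_source_attribution(ai_used, delaware_rag_used, business_description):
--     """Generate source attribution information (min-priority region selection)."""
--     bl = business_description.lower()
--     cannabis = any(w in bl for w in ["cannabis", "marijuana", "weed", "dispensary", "pot"])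
--
--     # region index = smallest priority among keywords present (5 = General fallback)
--     prio = min((p for w, p in _KEYWORD_PRIO if w in bl), default=5)
--
--     head = [] if not ai_used else ["**AI Source**: " + ai_used]
--     if delaware_rag_used:
--         head = head + _DELAWARE_RAG + (_CANNABIS_RAG if cannabis else [])
--
--     location_info, block = _REGIONS[prio]
--     if prio == 0 and cannabis:
--         block = block + _DELAWARE_CANNABIS
--
--     return location_info, head + block + [_FEDERAL_LINE]
-- ===== Notes on version B (the rewrite author's own statement) =====
-- stated objective: alternative
-- what changed: Region selection is no longer an ordered elif chain with early exit: B scans one flat (keyword, priority) table and takes the MINIMUM priority of all keywords found (scan order irrelevant), then indexes a region table by that priority; the sources list is assembled by concatenating constant sections instead of one-by-one appends.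
import Mathlib
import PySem

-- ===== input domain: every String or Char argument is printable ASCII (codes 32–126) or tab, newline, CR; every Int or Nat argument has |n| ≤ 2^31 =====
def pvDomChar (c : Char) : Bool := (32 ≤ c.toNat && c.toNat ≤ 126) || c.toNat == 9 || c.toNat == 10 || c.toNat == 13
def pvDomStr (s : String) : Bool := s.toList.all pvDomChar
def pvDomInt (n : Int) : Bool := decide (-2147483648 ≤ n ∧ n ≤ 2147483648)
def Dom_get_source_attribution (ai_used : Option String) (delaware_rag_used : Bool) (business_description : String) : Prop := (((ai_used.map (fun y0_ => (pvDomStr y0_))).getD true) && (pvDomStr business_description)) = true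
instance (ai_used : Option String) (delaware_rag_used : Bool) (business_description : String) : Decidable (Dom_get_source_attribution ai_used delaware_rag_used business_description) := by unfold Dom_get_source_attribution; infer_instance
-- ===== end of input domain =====

-- B replaces A's ordered elif chain by a min-priority reduction over one flat keyword table (alternative decomposition, same cost).

-- ===== PORT A =====
-- literal transliteration: sources accumulated by successive appends, branch order preserved
def get_source_attribution (ai_used : Option String) (delaware_rag_used : Bool) (business_description : String) : String × List String :=
  let business_lower := PySem.Str.lower business_description
  let is_delaware_query := ["delaware", "de", "first state"].any (fun w => PySem.Str.isIn w business_lower)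
  let is_cannabis_query := ["cannabis", "marijuana", "weed", "dispensary", "pot"].any (fun w => PySem.Str.isIn w business_lower)
  let sources : List String := []
  -- `if ai_used:` — truthy iff some nonempty string
  let sources := match ai_used with
    | none => sources
    | some s => if s = "" then sources else sources ++ ["**AI Source**: " ++ s]
  let sources := if delaware_rag_used then
      let sources := sources ++ ["**Delaware Data Source**: [Delaware Business First Steps](https://firststeps.delaware.gov/topics/)"]
      let sources := sources ++ ["**Vector Database**: Qdrant with semantic search"]
      let sources := sources ++ ["**Delaware Government Resources**: [Division of Corporations](https://corp.delaware.gov/), [Department of State](https://sos.delaware.gov/), [Division of Revenue](https://revenue.delaware.gov/)"]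
      if is_cannabis_query then
        let sources := sources ++ ["**Cannabis Compliance**: [Delaware Cannabis Compliance Commission](https://cannabis.delaware.gov/)"]
        let sources := sources ++ ["**Cannabis Licensing**: [Cannabis Licensing Portal](https://cannabis.delaware.gov/licensing/)"]
        let sources := sources ++ ["**Cannabis Regulations**: [Cannabis Regulations](https://cannabis.delaware.gov/regulations/)"]
        let sources := sources ++ ["**Cannabis Application**: [Application Portal](https://cannabis.delaware.gov/apply/)"]
        let sources := sources ++ ["**Cannabis Business Guide**: [Business Guide](https://cannabis.delaware.gov/business-guide/)"]
        let sources := sources ++ ["**Cannabis Compliance**: [Compliance Requirements](https://cannabis.delaware.gov/compliance/)"]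
        let sources := sources ++ ["**Cannabis Security**: [Security Requirements](https://cannabis.delaware.gov/security/)"]
        let sources := sources ++ ["**Cannabis Testing**: [Testing Requirements](https://cannabis.delaware.gov/testing/)"]
        let sources := sources ++ ["**Legal Framework**: [Delaware Marijuana Control Act](https://delcode.delaware.gov/title16/c047/)"]
        sources ++ ["**Medical Marijuana**: [Office of Medical Marijuana](https://dhss.delaware.gov/dhss/dph/hsp/medicalmarijuana.html)"]
      else sources
    else sources
  let (location_info, sources) :=
    if is_delaware_query then
      let sources := sources ++ ["**State Resources**: Delaware government websites"]
      let sources := sources ++ ["**Delaware Specific Links**: [Business First Steps](https://firststeps.delaware.gov/), [Professional Licensing](https://sos.delaware.gov/professional-regulation/), [Tax Registration](https://revenue.delaware.gov/business-tax-registration/)"]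
      if is_cannabis_query then
        let sources := sources ++ ["**Delaware Cannabis Resources**: [Cannabis Compliance Commission](https://cannabis.delaware.gov/), [Cannabis Licensing](https://cannabis.delaware.gov/licensing/), [Cannabis Regulations](https://cannabis.delaware.gov/regulations/)"]
        ("**Location**: Delaware", sources ++ ["**Delaware Cannabis Support**: DCCC Helpline 1-800-292-7935"])
      else ("**Location**: Delaware", sources)
    else if ["texas", "tx"].any (fun w => PySem.Str.isIn w business_lower) then
      let sources := sources ++ ["**State Resources**: Texas Secretary of State"]
      ("**Location**: Texas", sources ++ ["**Texas Specific Links**: [Texas Secretary of State](https://www.sos.state.tx.us/), [Texas Comptroller](https://comptroller.texas.gov/), [Texas Workforce Commission](https://www.twc.texas.gov/)"])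
    else if ["california", "ca", "cali"].any (fun w => PySem.Str.isIn w business_lower) then
      let sources := sources ++ ["**State Resources**: California Secretary of State"]
      ("**Location**: California", sources ++ ["**California Specific Links**: [CA Secretary of State](https://www.sos.ca.gov/), [CA Department of Tax](https://www.cdtfa.ca.gov/), [CA Employment Development](https://www.edd.ca.gov/)"])
    else if ["new york", "ny", "nyc"].any (fun w => PySem.Str.isIn w business_lower) then
      let sources := sources ++ ["**State Resources**: New York Department of State"]
      ("**Location**: New York", sources ++ ["**New York Specific Links**: [NY Department of State](https://www.dos.ny.gov/), [NY Department of Tax](https://www.tax.ny.gov/), [NY Department of Labor](https://www.labor.ny.gov/)"])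
    else if ["florida", "fl"].any (fun w => PySem.Str.isIn w business_lower) then
      let sources := sources ++ ["**State Resources**: Florida Department of State"]
      ("**Location**: Florida", sources ++ ["**Florida Specific Links**: [FL Department of State](https://dos.myflorida.com/), [FL Department of Revenue](https://floridarevenue.com/), [FL Department of Economic Opportunity](https://floridajobs.org/)"])
    else
      let sources := sources ++ ["**Federal Resources**: Small Business Administration (SBA)"]
      ("**Location**: General (Multiple States)", sources ++ ["**General Business Resources**: [SBA.gov](https://www.sba.gov/), [BusinessUSA](https://business.usa.gov/)"])
  let sources := sources ++ ["**Federal Resources**: [Small Business Administration](https://www.sba.gov/), [IRS Business](https://www.irs.gov/businesses)"]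
  (location_info, sources)

-- ===== PORT B =====
def pvKeywordPrio : List (String × Nat) :=
  [("delaware", 0), ("de", 0), ("first state", 0),
   ("texas", 1), ("tx", 1),
   ("california", 2), ("ca", 2), ("cali", 2),
   ("new york", 3), ("ny", 3), ("nyc", 3),
   ("florida", 4), ("fl", 4)]

-- Python's `min((p for w, p in _KEYWORD_PRIO if w in bl), default=5)` as a min-fold with the default as start
def pvPrio (bl : String) : Nat :=
  pvKeywordPrio.foldl (fun acc wp => if PySem.Str.isIn wp.1 bl then min acc wp.2 else acc) 5

def pvRegions : List (String × List String) :=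
  [ ("**Location**: Delaware",
      [ "**State Resources**: Delaware government websites",
        "**Delaware Specific Links**: [Business First Steps](https://firststeps.delaware.gov/), [Professional Licensing](https://sos.delaware.gov/professional-regulation/), [Tax Registration](https://revenue.delaware.gov/business-tax-registration/)" ]),
    ("**Location**: Texas",
      [ "**State Resources**: Texas Secretary of State",
        "**Texas Specific Links**: [Texas Secretary of State](https://www.sos.state.tx.us/), [Texas Comptroller](https://comptroller.texas.gov/), [Texas Workforce Commission](https://www.twc.texas.gov/)" ]),
    ("**Location**: California",
      [ "**State Resources**: California Secretary of State",
        "**California Specific Links**: [CA Secretary of State](https://www.sos.ca.gov/), [CA Department of Tax](https://www.cdtfa.ca.gov/), [CA Employment Development](https://www.edd.ca.gov/)" ]),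
    ("**Location**: New York",
      [ "**State Resources**: New York Department of State",
        "**New York Specific Links**: [NY Department of State](https://www.dos.ny.gov/), [NY Department of Tax](https://www.tax.ny.gov/), [NY Department of Labor](https://www.labor.ny.gov/)" ]),
    ("**Location**: Florida",
      [ "**State Resources**: Florida Department of State",
        "**Florida Specific Links**: [FL Department of State](https://dos.myflorida.com/), [FL Department of Revenue](https://floridarevenue.com/), [FL Department of Economic Opportunity](https://floridajobs.org/)" ]),
    ("**Location**: General (Multiple States)",
      [ "**Federal Resources**: Small Business Administration (SBA)",
        "**General Business Resources**: [SBA.gov](https://www.sba.gov/), [BusinessUSA](https://business.usa.gov/)" ]) ]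

def pvDelawareRag : List String :=
  [ "**Delaware Data Source**: [Delaware Business First Steps](https://firststeps.delaware.gov/topics/)",
    "**Vector Database**: Qdrant with semantic search",
    "**Delaware Government Resources**: [Division of Corporations](https://corp.delaware.gov/), [Department of State](https://sos.delaware.gov/), [Division of Revenue](https://revenue.delaware.gov/)" ]

def pvCannabisRag : List String :=
  [ "**Cannabis Compliance**: [Delaware Cannabis Compliance Commission](https://cannabis.delaware.gov/)",
    "**Cannabis Licensing**: [Cannabis Licensing Portal](https://cannabis.delaware.gov/licensing/)",
    "**Cannabis Regulations**: [Cannabis Regulations](https://cannabis.delaware.gov/regulations/)",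
    "**Cannabis Application**: [Application Portal](https://cannabis.delaware.gov/apply/)",
    "**Cannabis Business Guide**: [Business Guide](https://cannabis.delaware.gov/business-guide/)",
    "**Cannabis Compliance**: [Compliance Requirements](https://cannabis.delaware.gov/compliance/)",
    "**Cannabis Security**: [Security Requirements](https://cannabis.delaware.gov/security/)",
    "**Cannabis Testing**: [Testing Requirements](https://cannabis.delaware.gov/testing/)",
    "**Legal Framework**: [Delaware Marijuana Control Act](https://delcode.delaware.gov/title16/c047/)",
    "**Medical Marijuana**: [Office of Medical Marijuana](https://dhss.delaware.gov/dhss/dph/hsp/medicalmarijuana.html)" ]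

def pvDelawareCannabis : List String :=
  [ "**Delaware Cannabis Resources**: [Cannabis Compliance Commission](https://cannabis.delaware.gov/), [Cannabis Licensing](https://cannabis.delaware.gov/licensing/), [Cannabis Regulations](https://cannabis.delaware.gov/regulations/)",
    "**Delaware Cannabis Support**: DCCC Helpline 1-800-292-7935" ]

def pvFederalLine : String :=
  "**Federal Resources**: [Small Business Administration](https://www.sba.gov/), [IRS Business](https://www.irs.gov/businesses)"

def get_source_attribution_alt (ai_used : Option String) (delaware_rag_used : Bool) (business_description : String) : String × List String :=
  let bl := PySem.Str.lower business_description
  let cannabis := ["cannabis", "marijuana", "weed", "dispensary", "pot"].any (fun w => PySem.Str.isIn w bl)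
  let prio := pvPrio bl
  let head : List String := match ai_used with
    | none => []
    | some s => if s = "" then [] else ["**AI Source**: " ++ s]
  let head := if delaware_rag_used then
      head ++ pvDelawareRag ++ (if cannabis then pvCannabisRag else [])
    else head
  let (location_info, block) := pvRegions.getD prio ("", [])
  let block := if prio = 0 ∧ cannabis then block ++ pvDelawareCannabis else block
  (location_info, head ++ block ++ [pvFederalLine])

-- ===== PRECONDITION & SPEC =====
def Spec_get_source_attribution (ai_used : Option String) (delaware_rag_used : Bool) (business_description : String) (out : String × List String) : Prop := out = get_source_attribution_alt ai_used delaware_rag_used business_description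
instance (ai_used : Option String) (delaware_rag_used : Bool) (business_description : String) (out : String × List String) : Decidable (Spec_get_source_attribution ai_used delaware_rag_used business_description out) := by unfold Spec_get_source_attribution; infer_instance

-- ===== CLAIM (what is proved, stated in full; the proofs are below) =====
def Claim_equal_get_source_attribution : Prop := ∀ (ai_used : Option String) (delaware_rag_used : Bool) (business_description : String), Dom_get_source_attribution ai_used delaware_rag_used business_description → Spec_get_source_attribution ai_used delaware_rag_used business_description (get_source_attribution ai_used delaware_rag_used business_description)

-- ===== LEMMAS AND PROOFS =====

-- Bool-parameterized twin of the min-fold (definitionally equal to pvPrio; lets `decide` do the 2^13 case analysis)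
def pvPrioB (b1 b2 b3 b4 b5 b6 b7 b8 b9 b10 b11 b12 b13 : Bool) : Nat :=
  ([(b1, 0), (b2, 0), (b3, 0), (b4, 1), (b5, 1), (b6, 2), (b7, 2), (b8, 2),
    (b9, 3), (b10, 3), (b11, 3), (b12, 4), (b13, 4)] : List (Bool × Nat)).foldl
    (fun acc wp => if wp.1 then min acc wp.2 else acc) 5

theorem pvPrioB_eq (b1 b2 b3 b4 b5 b6 b7 b8 b9 b10 b11 b12 b13 : Bool) :
  pvPrioB b1 b2 b3 b4 b5 b6 b7 b8 b9 b10 b11 b12 b13 =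
    (if b1 || (b2 || (b3 || false)) then 0
     else if b4 || (b5 || false) then 1
     else if b6 || (b7 || (b8 || false)) then 2
     else if b9 || (b10 || (b11 || false)) then 3
     else if b12 || (b13 || false) then 4
     else 5) := by
  revert b1 b2 b3 b4 b5 b6 b7 b8 b9 b10 b11 b12 b13
  decide

-- the min-fold over the flat keyword table equals A's branch order: 0 if a Delaware keyword occurs, else 1 for Texas, …, else 5
theorem pvPrio_eq (bl : String) :
  pvPrio bl =
    (if ["delaware", "de", "first state"].any (fun w => PySem.Str.isIn w bl) then 0
     else if ["texas", "tx"].any (fun w => PySem.Str.isIn w bl) then 1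
     else if ["california", "ca", "cali"].any (fun w => PySem.Str.isIn w bl) then 2
     else if ["new york", "ny", "nyc"].any (fun w => PySem.Str.isIn w bl) then 3
     else if ["florida", "fl"].any (fun w => PySem.Str.isIn w bl) then 4
     else 5) := by
  have h : pvPrio bl = pvPrioB (PySem.Str.isIn "delaware" bl) (PySem.Str.isIn "de" bl)
      (PySem.Str.isIn "first state" bl) (PySem.Str.isIn "texas" bl) (PySem.Str.isIn "tx" bl)
      (PySem.Str.isIn "california" bl) (PySem.Str.isIn "ca" bl) (PySem.Str.isIn "cali" bl)
      (PySem.Str.isIn "new york" bl) (PySem.Str.isIn "ny" bl) (PySem.Str.isIn "nyc" bl)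
      (PySem.Str.isIn "florida" bl) (PySem.Str.isIn "fl" bl) := rfl
  rw [h, pvPrioB_eq]
  simp only [List.any_cons, List.any_nil]
  rfl

set_option maxHeartbeats 2000000 in
theorem pvCase_delaware (ai : Option String) (dr : Bool) (bd : String)
  (hdel : List.any ["delaware", "de", "first state"] (fun w => PySem.Str.isIn w (PySem.Str.lower bd)) = true) :
  get_source_attribution ai dr bd = get_source_attribution_alt ai dr bd := by
  unfold get_source_attribution get_source_attribution_alt
  dsimp only []
  simp only [pvPrio_eq]
  rw [hdel]
  cases hcan : List.any ["cannabis", "marijuana", "weed", "dispensary", "pot"]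
      (fun w => PySem.Str.isIn w (PySem.Str.lower bd)) <;>
  cases dr <;>
  (cases ai with
   | none => rfl
   | some s =>
       by_cases hs : s = ""
       · subst hs; rfl
       · simp only [if_neg hs]; rfl)

set_option maxHeartbeats 2000000 in
theorem pvCase_texas (ai : Option String) (dr : Bool) (bd : String)
  (hdel : List.any ["delaware", "de", "first state"] (fun w => PySem.Str.isIn w (PySem.Str.lower bd)) = false)
  (htx : List.any ["texas", "tx"] (fun w => PySem.Str.isIn w (PySem.Str.lower bd)) = true) :
  get_source_attribution ai dr bd = get_source_attribution_alt ai dr bd := by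
  unfold get_source_attribution get_source_attribution_alt
  dsimp only []
  simp only [pvPrio_eq]
  rw [hdel, htx]
  cases hcan : List.any ["cannabis", "marijuana", "weed", "dispensary", "pot"]
      (fun w => PySem.Str.isIn w (PySem.Str.lower bd)) <;>
  cases dr <;>
  (cases ai with
   | none => rfl
   | some s =>
       by_cases hs : s = ""
       · subst hs; rfl
       · simp only [if_neg hs]; rfl)

set_option maxHeartbeats 2000000 in
theorem pvCase_california (ai : Option String) (dr : Bool) (bd : String)
  (hdel : List.any ["delaware", "de", "first state"] (fun w => PySem.Str.isIn w (PySem.Str.lower bd)) = false)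
  (htx : List.any ["texas", "tx"] (fun w => PySem.Str.isIn w (PySem.Str.lower bd)) = false)
  (hca : List.any ["california", "ca", "cali"] (fun w => PySem.Str.isIn w (PySem.Str.lower bd)) = true) :
  get_source_attribution ai dr bd = get_source_attribution_alt ai dr bd := by
  unfold get_source_attribution get_source_attribution_alt
  dsimp only []
  simp only [pvPrio_eq]
  rw [hdel, htx, hca]
  cases hcan : List.any ["cannabis", "marijuana", "weed", "dispensary", "pot"]
      (fun w => PySem.Str.isIn w (PySem.Str.lower bd)) <;>
  cases dr <;>
  (cases ai with
   | none => rfl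
   | some s =>
       by_cases hs : s = ""
       · subst hs; rfl
       · simp only [if_neg hs]; rfl)

set_option maxHeartbeats 2000000 in
theorem pvCase_newyork (ai : Option String) (dr : Bool) (bd : String)
  (hdel : List.any ["delaware", "de", "first state"] (fun w => PySem.Str.isIn w (PySem.Str.lower bd)) = false)
  (htx : List.any ["texas", "tx"] (fun w => PySem.Str.isIn w (PySem.Str.lower bd)) = false)
  (hca : List.any ["california", "ca", "cali"] (fun w => PySem.Str.isIn w (PySem.Str.lower bd)) = false)
  (hny : List.any ["new york", "ny", "nyc"] (fun w => PySem.Str.isIn w (PySem.Str.lower bd)) = true) :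
  get_source_attribution ai dr bd = get_source_attribution_alt ai dr bd := by
  unfold get_source_attribution get_source_attribution_alt
  dsimp only []
  simp only [pvPrio_eq]
  rw [hdel, htx, hca, hny]
  cases hcan : List.any ["cannabis", "marijuana", "weed", "dispensary", "pot"]
      (fun w => PySem.Str.isIn w (PySem.Str.lower bd)) <;>
  cases dr <;>
  (cases ai with
   | none => rfl
   | some s =>
       by_cases hs : s = ""
       · subst hs; rfl
       · simp only [if_neg hs]; rfl)

set_option maxHeartbeats 2000000 in
theorem pvCase_florida (ai : Option String) (dr : Bool) (bd : String)
  (hdel : List.any ["delaware", "de", "first state"] (fun w => PySem.Str.isIn w (PySem.Str.lower bd)) = false)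
  (htx : List.any ["texas", "tx"] (fun w => PySem.Str.isIn w (PySem.Str.lower bd)) = false)
  (hca : List.any ["california", "ca", "cali"] (fun w => PySem.Str.isIn w (PySem.Str.lower bd)) = false)
  (hny : List.any ["new york", "ny", "nyc"] (fun w => PySem.Str.isIn w (PySem.Str.lower bd)) = false)
  (hfl : List.any ["florida", "fl"] (fun w => PySem.Str.isIn w (PySem.Str.lower bd)) = true) :
  get_source_attribution ai dr bd = get_source_attribution_alt ai dr bd := by
  unfold get_source_attribution get_source_attribution_alt
  dsimp only []
  simp only [pvPrio_eq]
  rw [hdel, htx, hca, hny, hfl]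
  cases hcan : List.any ["cannabis", "marijuana", "weed", "dispensary", "pot"]
      (fun w => PySem.Str.isIn w (PySem.Str.lower bd)) <;>
  cases dr <;>
  (cases ai with
   | none => rfl
   | some s =>
       by_cases hs : s = ""
       · subst hs; rfl
       · simp only [if_neg hs]; rfl)

set_option maxHeartbeats 2000000 in
theorem pvCase_general (ai : Option String) (dr : Bool) (bd : String)
  (hdel : List.any ["delaware", "de", "first state"] (fun w => PySem.Str.isIn w (PySem.Str.lower bd)) = false)
  (htx : List.any ["texas", "tx"] (fun w => PySem.Str.isIn w (PySem.Str.lower bd)) = false)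
  (hca : List.any ["california", "ca", "cali"] (fun w => PySem.Str.isIn w (PySem.Str.lower bd)) = false)
  (hny : List.any ["new york", "ny", "nyc"] (fun w => PySem.Str.isIn w (PySem.Str.lower bd)) = false)
  (hfl : List.any ["florida", "fl"] (fun w => PySem.Str.isIn w (PySem.Str.lower bd)) = false) :
  get_source_attribution ai dr bd = get_source_attribution_alt ai dr bd := by
  unfold get_source_attribution get_source_attribution_alt
  dsimp only []
  simp only [pvPrio_eq]
  rw [hdel, htx, hca, hny, hfl]
  cases hcan : List.any ["cannabis", "marijuana", "weed", "dispensary", "pot"]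
      (fun w => PySem.Str.isIn w (PySem.Str.lower bd)) <;>
  cases dr <;>
  (cases ai with
   | none => rfl
   | some s =>
       by_cases hs : s = ""
       · subst hs; rfl
       · simp only [if_neg hs]; rfl)

-- ===== VERDICT (by name: the statement is the Claim_ definition above) =====
theorem get_source_attribution_spec : Claim_equal_get_source_attribution := by
  intro ai dr bd _
  unfold Spec_get_source_attribution
  by_cases hdel : List.any ["delaware", "de", "first state"] (fun w => PySem.Str.isIn w (PySem.Str.lower bd)) = true
  · exact pvCase_delaware ai dr bd hdel
  · rw [Bool.not_eq_true] at hdel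
    by_cases htx : List.any ["texas", "tx"] (fun w => PySem.Str.isIn w (PySem.Str.lower bd)) = true
    · exact pvCase_texas ai dr bd hdel htx
    · rw [Bool.not_eq_true] at htx
      by_cases hca : List.any ["california", "ca", "cali"] (fun w => PySem.Str.isIn w (PySem.Str.lower bd)) = true
      · exact pvCase_california ai dr bd hdel htx hca
      · rw [Bool.not_eq_true] at hca
        by_cases hny : List.any ["new york", "ny", "nyc"] (fun w => PySem.Str.isIn w (PySem.Str.lower bd)) = true
        · exact pvCase_newyork ai dr bd hdel htx hca hny
        · rw [Bool.not_eq_true] at hny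
          by_cases hfl : List.any ["florida", "fl"] (fun w => PySem.Str.isIn w (PySem.Str.lower bd)) = true
          · exact pvCase_florida ai dr bd hdel htx hca hny hfl
          · rw [Bool.not_eq_true] at hfl
            exact pvCase_general ai dr bd hdel htx hca hny hfl
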